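-- pv_equiv track=rewrite | github.com/Vinayak4562/Practiced_Codes | Programs/2_Second_Paper/17_replac_duplicate_alpha.py | replace_duplicates
-- ===== SOURCE A (Python) =====
-- def replace_duplicates(string):
--
--     modified_string = ""                                         # Initialize an empty string to store the modified string
--
--     i = 0                                                       # Iterate through the characters in the string
--     while i < len(string):
--
--         modified_string += string[i]                            # Append the current character to the modified string
--
--         if i+1 < len(string) and string[i] == string[i+1]:      # Check if the current character is equal to the next character
--
--             modified_string += '_'                              # If so, append '_' to the modified string
--             i += 1                                              # Skip the next character
--         i += 1                                                  # Increment the index variable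
--     return modified_string                                      # Return the modified string
-- ===== SOURCE B (Python) =====
-- import re
--
-- def replace_duplicates(string):
--     # One regex substitution: each non-overlapping pair of identical adjacent
--     # characters (.)\1 is rewritten to the character followed by '_'.
--     return re.sub(r'(.)\1', r'\1_', string, flags=re.DOTALL)
-- ===== Notes on version B (the rewrite author's own statement) =====
-- stated objective: faster
-- what changed: Replaces the hand-written O(n^2) index loop (repeated string concatenation) with a single linear regex substitution re.sub(r'(.)\1', r'\1_', string, flags=re.DOTALL), whose non-overlapping left-to-right scan reproduces the pair-consuming behaviour.
import Mathlib
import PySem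

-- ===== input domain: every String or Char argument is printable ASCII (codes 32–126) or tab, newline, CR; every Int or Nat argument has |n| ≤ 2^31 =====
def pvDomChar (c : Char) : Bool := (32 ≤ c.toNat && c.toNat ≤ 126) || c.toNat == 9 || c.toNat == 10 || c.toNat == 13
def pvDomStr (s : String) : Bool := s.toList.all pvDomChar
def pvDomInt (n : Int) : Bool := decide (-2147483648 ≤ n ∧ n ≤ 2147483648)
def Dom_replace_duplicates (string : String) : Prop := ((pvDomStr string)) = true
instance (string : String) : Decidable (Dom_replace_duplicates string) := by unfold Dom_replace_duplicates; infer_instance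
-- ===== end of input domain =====

-- B replaces A's index-driven while loop by a single regex substitution (re.sub on pattern (.)\1);
-- its port below is a step-for-step hand port of re.sub's non-overlapping left-to-right scan for that pattern.


-- ===== PORT A =====
-- A's while loop over the index i, building modified_string by +=; i is skipped by 2 after a pair.
def replaceDupLoopA (s : List Char) (i : Nat) (acc : List Char) : List Char :=
  if h : i < s.length then
    let acc1 := acc ++ [s.getD i ' ']                 -- modified_string += string[i]
    if i + 1 < s.length ∧ s.getD i ' ' = s.getD (i+1) ' ' then
      replaceDupLoopA s (i + 2) (acc1 ++ ['_'])       -- append '_' and skip the next character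
    else
      replaceDupLoopA s (i + 1) acc1
  else acc
termination_by s.length - i
decreasing_by all_goals omega

def replace_duplicates (string : String) : String :=
  String.ofList (replaceDupLoopA string.toList 0 [])

-- ===== PORT B =====
-- Hand port of re.sub(r'(.)\1', r'\1_', string, flags=re.DOTALL): the scan tries to match the
-- pattern (two identical adjacent characters, '.' matching any character incl. '\n') at the current
-- position; on a match it emits the character plus '_' and resumes AFTER the match (non-overlapping),
-- otherwise it emits the character and advances by one. Exact for this pattern on every input.
def reSubPairScan : List Char → List Char
  | [] => []
  | [c] => [c]
  | c :: d :: rest =>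
    if c = d then c :: '_' :: reSubPairScan rest
    else c :: reSubPairScan (d :: rest)

def replace_duplicates_alt (string : String) : String :=
  String.ofList (reSubPairScan string.toList)

-- ===== PRECONDITION & SPEC =====
def Spec_replace_duplicates (string : String) (out : String) : Prop := out = replace_duplicates_alt string
instance (string : String) (out : String) : Decidable (Spec_replace_duplicates string out) := by unfold Spec_replace_duplicates; infer_instance

-- ===== CLAIM (what is proved, stated in full; the proofs are below) =====
def Claim_equal_replace_duplicates : Prop := ∀ (string : String), Dom_replace_duplicates string → Spec_replace_duplicates string (replace_duplicates string)

-- ===== LEMMAS AND PROOFS =====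
lemma replaceDupLoopA_eq (n : Nat) : ∀ (s : List Char) (i : Nat) (acc : List Char),
    s.length - i = n → replaceDupLoopA s i acc = acc ++ reSubPairScan (s.drop i) := by
  induction n using Nat.strong_induction_on with
  | _ n ih =>
    intro s i acc hn
    rw [replaceDupLoopA]
    by_cases h : i < s.length
    · simp only [h, dif_pos]
      have hdrop : s.drop i = s[i] :: s.drop (i+1) := List.drop_eq_getElem_cons h
      have hget : s.getD i ' ' = s[i] := List.getD_eq_getElem s ' ' h
      by_cases h2 : i + 1 < s.length ∧ s.getD i ' ' = s.getD (i+1) ' '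
      · have h1 : i + 1 < s.length := h2.1
        have hdrop1 : s.drop (i+1) = s[i+1] :: s.drop (i+2) := List.drop_eq_getElem_cons h1
        have hget1 : s.getD (i+1) ' ' = s[i+1] := List.getD_eq_getElem s ' ' h1
        simp only [if_pos h2]
        rw [ih (s.length - (i+2)) (by omega) s (i+2) _ rfl]
        rw [hdrop, hdrop1, reSubPairScan]
        have heq : s[i] = s[i+1] := by rw [← hget, ← hget1]; exact h2.2
        simp [heq, List.getElem?_eq_getElem h]
      · simp only [h2, if_neg, not_false_iff]
        rw [ih (s.length - (i+1)) (by omega) s (i+1) _ rfl]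
        rw [hdrop, hget]
        rcases Nat.lt_or_ge (i+1) s.length with h1 | h1
        · have hdrop1 : s.drop (i+1) = s[i+1] :: s.drop (i+2) := List.drop_eq_getElem_cons h1
          have hne : s[i] ≠ s[i+1] := by
            intro hc
            exact h2 ⟨h1, by rw [List.getD_eq_getElem s ' ' h, List.getD_eq_getElem s ' ' h1]; exact hc⟩
          rw [hdrop1, reSubPairScan]
          simp [hne]
        · have : s.drop (i+1) = [] := List.drop_eq_nil_of_le h1
          rw [this, reSubPairScan, reSubPairScan]
          simp
    · simp only [h, dif_neg, not_false_iff]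
      have : s.drop i = [] := List.drop_eq_nil_of_le (by omega)
      rw [this, reSubPairScan]
      simp

-- ===== VERDICT (by name: the statement is the Claim_ definition above) =====
theorem replace_duplicates_spec : Claim_equal_replace_duplicates := by
  intro s _
  unfold Spec_replace_duplicates replace_duplicates replace_duplicates_alt
  rw [replaceDupLoopA_eq (s.toList.length - 0) s.toList 0 [] rfl]
  simp
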